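-- pv_equiv track=rewrite | github.com/MarioCastellanos/SimpleGeneFinderForSalmonella | GeneFinder.py | oneFrame
-- ===== SOURCE A (Python) =====
-- def oneFrame(DNA):
--     codon_list = []
--     for i in range(0, len(DNA), +3):
--         curr_codon = DNA[i:i+3]
--         if curr_codon == "ATG":
--             Finished = False
--             loc = i
--             CCF = curr_codon # CCF is short for Current Codon in Frame  and stores the current codon for the ORF
--             curr_Frame = ""
--             while loc < len(DNA) and not Finished:
--                 CCF = DNA[loc:loc+3]
--                 if CCF != "TAG" and CCF != "TGA" and CCF != "TAA":
--                     curr_Frame += CCF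
--                 else :
--                     Finished = True
--                 loc += 3
--             codon_list.append(curr_Frame)
--
--     return codon_list
-- ===== SOURCE B (Python) =====
-- def oneFrame(DNA):
--     orfs = []
--     next_stop = None
--     for pos in reversed(range(0, len(DNA), 3)):
--         codon = DNA[pos:pos+3]
--         if codon in ("TAG", "TGA", "TAA"):
--             next_stop = pos
--         elif codon == "ATG":
--             orfs.append(DNA[pos:next_stop] if next_stop is not None else DNA[pos:])
--     orfs.reverse()
--     return orfs
-- ===== Notes on version B (the rewrite author's own statement) =====
-- stated objective: alternative
-- what changed: Replaced the per-ATG inner forward rescan with a single backward pass over in-frame positions that maintains the position of the next stop codon and emits each ORF by one slice.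
import Mathlib
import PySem

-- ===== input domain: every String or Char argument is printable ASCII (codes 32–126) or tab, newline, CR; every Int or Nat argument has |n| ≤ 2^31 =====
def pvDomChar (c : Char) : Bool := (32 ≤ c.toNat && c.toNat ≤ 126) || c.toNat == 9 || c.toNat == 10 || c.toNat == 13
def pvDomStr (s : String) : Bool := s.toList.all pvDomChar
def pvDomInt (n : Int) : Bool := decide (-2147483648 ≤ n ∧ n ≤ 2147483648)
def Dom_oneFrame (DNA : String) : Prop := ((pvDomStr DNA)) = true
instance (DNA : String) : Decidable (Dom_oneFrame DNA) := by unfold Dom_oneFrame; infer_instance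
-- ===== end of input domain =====

-- B replaces A's per-ATG inner forward rescan by one backward pass that remembers the next stop-codon position and slices each ORF out directly.

-- ===== PORT A =====
-- A's inner `while loc < len(DNA) and not Finished` loop; the `Finished = True` branch becomes returning the accumulated frame.
def oneFrameWhile (s : List Char) (loc : Int) (acc : List Char) : List Char :=
  if _h : loc < (s.length : Int) then
    if PySem.List.slice s (some loc) (some (loc + 3)) ≠ "TAG".toList ∧
       PySem.List.slice s (some loc) (some (loc + 3)) ≠ "TGA".toList ∧
       PySem.List.slice s (some loc) (some (loc + 3)) ≠ "TAA".toList then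
      oneFrameWhile s (loc + 3) (acc ++ PySem.List.slice s (some loc) (some (loc + 3)))
    else acc
  else acc
termination_by ((s.length : Int) - loc).toNat
decreasing_by omega

def oneFrame (DNA : String) : List String :=
  (PySem.List.pyRange 0 (PySem.Str.len DNA) 3).foldl
    (fun codon_list i =>
      if PySem.List.slice DNA.toList (some i) (some (i + 3)) = "ATG".toList then
        codon_list ++ [String.ofList (oneFrameWhile DNA.toList i [])]
      else codon_list) []

-- ===== PORT B =====
-- one step of B's backward loop; state = (ORFs emitted so far, position of the next stop codon)
def bStep (s : List Char) (st : List String × Option Int) (pos : Int) : List String × Option Int :=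
  if PySem.List.slice s (some pos) (some (pos + 3)) = "TAG".toList ∨
     PySem.List.slice s (some pos) (some (pos + 3)) = "TGA".toList ∨
     PySem.List.slice s (some pos) (some (pos + 3)) = "TAA".toList then
    (st.1, some pos)
  else if PySem.List.slice s (some pos) (some (pos + 3)) = "ATG".toList then
    (st.1 ++ [String.ofList (match st.2 with
       | some ns => PySem.List.slice s (some pos) (some ns)
       | none => PySem.List.slice s (some pos) none)], st.2)
  else st

def oneFrame_alt (DNA : String) : List String :=
  (((PySem.List.pyRange 0 (PySem.Str.len DNA) 3).reverse).foldl (bStep DNA.toList) ([], none)).1.reverse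

-- ===== PRECONDITION & SPEC =====
def Spec_oneFrame (DNA : String) (out : List String) : Prop := out = oneFrame_alt DNA
instance (DNA : String) (out : List String) : Decidable (Spec_oneFrame DNA out) := by unfold Spec_oneFrame; infer_instance

-- ===== CLAIM (what is proved, stated in full; the proofs are below) =====
def Claim_equal_oneFrame : Prop := ∀ (DNA : String), Dom_oneFrame DNA → Spec_oneFrame DNA (oneFrame DNA)

-- ===== LEMMAS AND PROOFS =====

def firstStop (s : List Char) (loc : Int) : Option Int :=
  if _h : loc < (s.length : Int) then
    if PySem.List.slice s (some loc) (some (loc + 3)) = "TAG".toList ∨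
       PySem.List.slice s (some loc) (some (loc + 3)) = "TGA".toList ∨
       PySem.List.slice s (some loc) (some (loc + 3)) = "TAA".toList then some loc
    else firstStop s (loc + 3)
  else none
termination_by ((s.length : Int) - loc).toNat
decreasing_by omega

def mkOrf (s : List Char) (loc : Int) : List Char :=
  match firstStop s loc with
  | some st => PySem.List.slice s (some loc) (some st)
  | none => PySem.List.slice s (some loc) none

lemma firstStop_le (s : List Char) :
    ∀ (k : Nat) (loc st : Int), ((s.length : Int) - loc).toNat ≤ k →
      firstStop s loc = some st → loc ≤ st := by
  intro k
  induction k with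
  | zero =>
    intro loc st hk h
    rw [firstStop, dif_neg (by omega)] at h
    exact absurd h (by simp)
  | succ k ih =>
    intro loc st hk h
    rw [firstStop] at h
    by_cases hlt : loc < (s.length : Int)
    · rw [dif_pos hlt] at h
      split at h
      · simp only [Option.some.injEq] at h
        omega
      · have := ih (loc + 3) st (by omega) h
        omega
    · rw [dif_neg hlt] at h
      exact absurd h (by simp)

lemma mkOrf_of_ge (s : List Char) (loc : Int) (h0 : 0 ≤ loc) (h : ¬ loc < (s.length : Int)) :
    mkOrf s loc = [] := by
  rw [mkOrf, firstStop, dif_neg h, PySem.List.slice_from s h0,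
      List.drop_eq_nil_of_le (by omega)]

lemma mkOrf_of_stop (s : List Char) (loc : Int) (h0 : 0 ≤ loc) (hlt : loc < (s.length : Int))
    (hs : PySem.List.slice s (some loc) (some (loc + 3)) = "TAG".toList ∨
          PySem.List.slice s (some loc) (some (loc + 3)) = "TGA".toList ∨
          PySem.List.slice s (some loc) (some (loc + 3)) = "TAA".toList) :
    mkOrf s loc = [] := by
  rw [mkOrf, firstStop, dif_pos hlt, if_pos hs]
  show PySem.List.slice s (some loc) (some loc) = []
  rw [PySem.List.slice_toNat s h0 h0]
  simp

lemma firstStop_step (s : List Char) (loc : Int) (hlt : loc < (s.length : Int))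
    (hs : ¬ (PySem.List.slice s (some loc) (some (loc + 3)) = "TAG".toList ∨
          PySem.List.slice s (some loc) (some (loc + 3)) = "TGA".toList ∨
          PySem.List.slice s (some loc) (some (loc + 3)) = "TAA".toList)) :
    firstStop s loc = firstStop s (loc + 3) := by
  rw [firstStop, dif_pos hlt, if_neg hs]

lemma mkOrf_step (s : List Char) (loc : Int) (h0 : 0 ≤ loc) (hlt : loc < (s.length : Int))
    (hs : ¬ (PySem.List.slice s (some loc) (some (loc + 3)) = "TAG".toList ∨
          PySem.List.slice s (some loc) (some (loc + 3)) = "TGA".toList ∨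
          PySem.List.slice s (some loc) (some (loc + 3)) = "TAA".toList)) :
    mkOrf s loc = PySem.List.slice s (some loc) (some (loc + 3)) ++ mkOrf s (loc + 3) := by
  have h3 : (loc + 3).toNat = loc.toNat + 3 := by omega
  cases hfs : firstStop s (loc + 3) with
  | none =>
    have e1 : mkOrf s loc = PySem.List.slice s (some loc) none := by
      rw [mkOrf, firstStop_step s loc hlt hs, hfs]
    have e2 : mkOrf s (loc + 3) = PySem.List.slice s (some (loc + 3)) none := by
      rw [mkOrf, hfs]
    rw [e1, e2, PySem.List.slice_from s h0, PySem.List.slice_from s (by omega),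
        PySem.List.slice_toNat s h0 (by omega), h3]
    have h4 : loc.toNat + 3 - loc.toNat = 3 := by omega
    rw [h4, ← List.drop_drop, List.take_append_drop]
  | some st =>
    have hle : loc + 3 ≤ st := firstStop_le s ((s.length : Int) - (loc+3)).toNat (loc+3) st (le_refl _) hfs
    have e1 : mkOrf s loc = PySem.List.slice s (some loc) (some st) := by
      rw [mkOrf, firstStop_step s loc hlt hs, hfs]
    have e2 : mkOrf s (loc + 3) = PySem.List.slice s (some (loc + 3)) (some st) := by
      rw [mkOrf, hfs]
    rw [e1, e2, PySem.List.slice_toNat s h0 (by omega), PySem.List.slice_toNat s h0 (by omega),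
        PySem.List.slice_toNat s (by omega) (by omega), h3]
    have h1 : loc.toNat + 3 - loc.toNat = 3 := by omega
    have h2 : st.toNat - loc.toNat = 3 + (st.toNat - (loc.toNat + 3)) := by omega
    rw [h1, h2, List.take_add, ← List.drop_drop]

def specList (s : List Char) (loc : Int) : List String :=
  if loc < (s.length : Int) then
    (if PySem.List.slice s (some loc) (some (loc + 3)) = "ATG".toList then
      [String.ofList (mkOrf s loc)] else []) ++ specList s (loc + 3)
  else []
termination_by ((s.length : Int) - loc).toNat
decreasing_by omega

lemma pyRange3_nil (a b : Int) (h : b ≤ a) : PySem.List.pyRange a b 3 = [] := by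
  rw [PySem.List.pyRange_of_pos _ _ (by norm_num), if_neg (by omega)]
  simp

lemma pyRange3_cons (a b : Int) (h : a < b) :
    PySem.List.pyRange a b 3 = a :: PySem.List.pyRange (a + 3) b 3 := by
  rw [PySem.List.pyRange_of_pos _ _ (by norm_num),
      PySem.List.pyRange_of_pos _ _ (by norm_num), if_pos h]
  have hN : ((b - a + 3 - 1) / 3).toNat
      = (if a + 3 < b then ((b - (a + 3) + 3 - 1) / 3).toNat else 0) + 1 := by
    split <;> omega
  rw [hN, List.range_succ_eq_map]
  simp only [List.map_cons, List.map_map]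
  refine congrArg₂ _ (by push_cast; ring) (List.map_congr_left ?_)
  intro k _
  simp only [Function.comp_apply]
  push_cast
  ring

lemma while_eq (s : List Char) :
    ∀ (k : Nat) (loc : Int) (acc : List Char), ((s.length : Int) - loc).toNat ≤ k →
      0 ≤ loc → oneFrameWhile s loc acc = acc ++ mkOrf s loc := by
  intro k
  induction k with
  | zero =>
    intro loc acc hk h0
    rw [oneFrameWhile, dif_neg (by omega), mkOrf_of_ge s loc h0 (by omega), List.append_nil]
  | succ k ih =>
    intro loc acc hk h0
    by_cases hlt : loc < (s.length : Int)
    · rw [oneFrameWhile, dif_pos hlt]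
      by_cases hs : PySem.List.slice s (some loc) (some (loc + 3)) = "TAG".toList ∨
          PySem.List.slice s (some loc) (some (loc + 3)) = "TGA".toList ∨
          PySem.List.slice s (some loc) (some (loc + 3)) = "TAA".toList
      · rw [if_neg (by tauto), mkOrf_of_stop s loc h0 hlt hs, List.append_nil]
      · rw [if_pos (by tauto), ih (loc + 3) _ (by omega) (by omega),
            mkOrf_step s loc h0 hlt hs, List.append_assoc]
    · rw [oneFrameWhile, dif_neg hlt, mkOrf_of_ge s loc h0 hlt, List.append_nil]

lemma bfold_eq (s : List Char) :
    ∀ (k : Nat) (loc : Int), ((s.length : Int) - loc).toNat ≤ k → 0 ≤ loc →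
      (PySem.List.pyRange loc (s.length : Int) 3).foldr (fun x y => bStep s y x) ([], none)
        = ((specList s loc).reverse, firstStop s loc) := by
  intro k
  induction k with
  | zero =>
    intro loc hk h0
    rw [pyRange3_nil _ _ (by omega), specList, if_neg (by omega), firstStop, dif_neg (by omega)]
    simp
  | succ k ih =>
    intro loc hk h0
    by_cases hlt : loc < (s.length : Int)
    · rw [pyRange3_cons _ _ hlt, List.foldr_cons, ih (loc + 3) (by omega) (by omega)]
      by_cases hs : PySem.List.slice s (some loc) (some (loc + 3)) = "TAG".toList ∨
          PySem.List.slice s (some loc) (some (loc + 3)) = "TGA".toList ∨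
          PySem.List.slice s (some loc) (some (loc + 3)) = "TAA".toList
      · have hATG : ¬ PySem.List.slice s (some loc) (some (loc + 3)) = "ATG".toList := by
          intro h
          rcases hs with h1 | h1 | h1 <;> rw [h] at h1 <;> exact absurd h1 (by decide)
        rw [bStep, if_pos hs]
        conv_rhs => rw [specList, if_pos hlt, if_neg hATG, List.nil_append,
                        firstStop, dif_pos hlt, if_pos hs]
      · rw [bStep, if_neg hs]
        by_cases hATG : PySem.List.slice s (some loc) (some (loc + 3)) = "ATG".toList
        · rw [if_pos hATG]
          conv_rhs => rw [specList, if_pos hlt, if_pos hATG]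
          rw [List.reverse_append, List.reverse_singleton, firstStop_step s loc hlt hs]
          have hm : (match firstStop s (loc + 3) with
              | some ns => PySem.List.slice s (some loc) (some ns)
              | none => PySem.List.slice s (some loc) none) = mkOrf s loc := by
            rw [mkOrf, firstStop_step s loc hlt hs]
          rw [hm]
        · rw [if_neg hATG]
          conv_rhs => rw [specList, if_pos hlt, if_neg hATG, List.nil_append,
                          firstStop_step s loc hlt hs]
    · rw [pyRange3_nil _ _ (by omega), specList, if_neg hlt, firstStop, dif_neg hlt]
      simp

lemma afold_eq (s : List Char) :
    ∀ (k : Nat) (loc : Int) (acc : List String), ((s.length : Int) - loc).toNat ≤ k → 0 ≤ loc →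
      (PySem.List.pyRange loc (s.length : Int) 3).foldl
        (fun codon_list i =>
          if PySem.List.slice s (some i) (some (i + 3)) = "ATG".toList then
            codon_list ++ [String.ofList (oneFrameWhile s i [])]
          else codon_list) acc
        = acc ++ specList s loc := by
  intro k
  induction k with
  | zero =>
    intro loc acc hk h0
    rw [pyRange3_nil _ _ (by omega), specList, if_neg (by omega)]
    simp
  | succ k ih =>
    intro loc acc hk h0
    by_cases hlt : loc < (s.length : Int)
    · rw [pyRange3_cons _ _ hlt]
      simp only [List.foldl_cons]
      by_cases hATG : PySem.List.slice s (some loc) (some (loc + 3)) = "ATG".toList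
      · rw [if_pos hATG, ih (loc + 3) _ (by omega) (by omega)]
        conv_rhs => rw [specList, if_pos hlt, if_pos hATG]
        rw [while_eq s ((s.length : Int) - loc).toNat loc [] (le_refl _) h0, List.nil_append,
            List.append_assoc]
      · rw [if_neg hATG, ih (loc + 3) _ (by omega) (by omega)]
        conv_rhs => rw [specList, if_pos hlt, if_neg hATG, List.nil_append]
    · rw [pyRange3_nil _ _ (by omega), specList, if_neg hlt]
      simp

-- ===== VERDICT (by name: the statement is the Claim_ definition above) =====
theorem oneFrame_spec : Claim_equal_oneFrame := by
  intro DNA _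
  unfold Spec_oneFrame oneFrame oneFrame_alt
  simp only [PySem.Str.len_eq]
  rw [List.foldl_reverse,
      bfold_eq DNA.toList ((DNA.toList.length : Int) - 0).toNat 0 (le_refl _) (by omega),
      afold_eq DNA.toList ((DNA.toList.length : Int) - 0).toNat 0 [] (le_refl _) (by omega)]
  simp
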